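-- pv_equiv track=rewrite | github.com/willschlitzer/wiki_article_generator | state_politician_article_generator/state_congressmen.py | gen_town_string
-- ===== SOURCE A (Python) =====
-- def gen_town_string(town_list, state):
--     town_string = ""
--     for i, town in enumerate(town_list):
--         if i == len(town_list) - 1 and len(town_list) > 1:
--             town_string += " and "
--         town_link = "[[" + town + ", " + state + "|" + town + "]]"
--         town_string += town_link
--         if i < len(town_list) - 1 and len(town_list) > 2:
--             town_string += ", "
--     if len(town_list) > 1:
--         town_plural = "towns"
--     else:
--         town_plural = "town"
--     return town_string, town_plural
-- ===== SOURCE B (Python) =====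
-- # B: build the link strings in one comprehension, then assemble the sentence by
-- # branching on the number of links (join + Oxford comma) instead of deciding
-- # separators per loop iteration.  A's n>=3 joiner is ", " followed by " and ",
-- # i.e. ",  and " (two spaces); B reproduces that exact output.
-- def gen_town_string(town_list, state):
--     links = ["[[" + t + ", " + state + "|" + t + "]]" for t in town_list]
--     if not links:
--         town_string = ""
--     elif len(links) == 1:
--         town_string = links[0]
--     elif len(links) == 2:
--         town_string = links[0] + " and " + links[1]
--     else:
--         town_string = ", ".join(links[:-1]) + ",  and " + links[-1]
--     town_plural = "towns" if len(town_list) > 1 else "town"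
--     return town_string, town_plural
-- ===== Notes on version B (the rewrite author's own statement) =====
-- stated objective: idiomatic
-- what changed: B builds all link strings with one comprehension and assembles the sentence by branching on the count (join of all-but-last plus an Oxford ', and' / plain ' and'), instead of A's single loop that decides prefix/suffix separators per index.
import Mathlib
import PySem

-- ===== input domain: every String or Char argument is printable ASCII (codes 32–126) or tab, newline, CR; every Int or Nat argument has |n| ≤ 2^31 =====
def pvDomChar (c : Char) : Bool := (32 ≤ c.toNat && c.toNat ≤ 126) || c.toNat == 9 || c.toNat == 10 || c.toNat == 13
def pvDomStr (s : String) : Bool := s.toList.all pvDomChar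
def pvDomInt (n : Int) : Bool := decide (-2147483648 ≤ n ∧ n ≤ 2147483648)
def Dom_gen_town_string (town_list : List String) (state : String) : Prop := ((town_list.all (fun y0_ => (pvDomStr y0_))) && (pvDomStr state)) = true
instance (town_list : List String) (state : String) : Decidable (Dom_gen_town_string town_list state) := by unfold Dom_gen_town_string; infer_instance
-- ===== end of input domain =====

-- B is an idiomatic re-decomposition (comprehension + count-based assembly) of A's
-- per-index separator loop; same return value, proved equal on the whole domain.

-- ===== PORT A =====
-- strings are ported as List Char (PySem.Chars) and packed with String.ofList at the end
def gen_town_string (town_list : List String) (state : String) : String × String :=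
  let n : Int := (town_list.length : Int)
  let town_string : List Char :=
    (PySem.List.enumerate town_list).foldl
      (fun acc p =>
        let acc := if p.1 = n - 1 ∧ 1 < n then acc ++ " and ".toList else acc
        let town_link := "[[".toList ++ p.2.toList ++ ", ".toList ++ state.toList
                          ++ "|".toList ++ p.2.toList ++ "]]".toList
        let acc := acc ++ town_link
        if p.1 < n - 1 ∧ 2 < n then acc ++ ", ".toList else acc)
      []
  let town_plural := if 1 < n then "towns" else "town"
  (String.ofList town_string, town_plural)

-- ===== PORT B =====
def pvLink (t : String) (state : String) : List Char :=
  "[[".toList ++ t.toList ++ ", ".toList ++ state.toList ++ "|".toList ++ t.toList ++ "]]".toList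

def gen_town_string_alt (town_list : List String) (state : String) : String × String :=
  let links := town_list.map (fun t => pvLink t state)
  let town_string : List Char :=
    match links with
    | [] => []
    | [l] => l
    | [l1, l2] => l1 ++ " and ".toList ++ l2
    | ls => PySem.Chars.join ", ".toList ls.dropLast ++ ",  and ".toList ++ ls.getLast!
  let town_plural := if 1 < town_list.length then "towns" else "town"
  (String.ofList town_string, town_plural)

-- ===== PRECONDITION & SPEC =====
def Spec_gen_town_string (town_list : List String) (state : String) (out : String × String) : Prop := out = gen_town_string_alt town_list state
instance (town_list : List String) (state : String) (out : String × String) : Decidable (Spec_gen_town_string town_list state out) := by unfold Spec_gen_town_string; infer_instance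

-- ===== CLAIM (what is proved, stated in full; the proofs are below) =====
def Claim_equal_gen_town_string : Prop := ∀ (town_list : List String) (state : String), Dom_gen_town_string town_list state → Spec_gen_town_string town_list state (gen_town_string town_list state)

-- ===== LEMMAS AND PROOFS =====

-- the per-element contribution of A's loop body
def pvG (state : String) (n : Int) (p : Int × String) : List Char :=
  (if p.1 = n - 1 ∧ 1 < n then " and ".toList else [])
    ++ ("[[".toList ++ p.2.toList ++ ", ".toList ++ state.toList
          ++ "|".toList ++ p.2.toList ++ "]]".toList)
    ++ (if p.1 < n - 1 ∧ 2 < n then ", ".toList else [])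

theorem pvA_fold_eq (state : String) (n : Int) (l : List (Int × String)) (acc : List Char) :
    l.foldl
      (fun acc p =>
        let acc := if p.1 = n - 1 ∧ 1 < n then acc ++ " and ".toList else acc
        let town_link := "[[".toList ++ p.2.toList ++ ", ".toList ++ state.toList
                          ++ "|".toList ++ p.2.toList ++ "]]".toList
        let acc := acc ++ town_link
        if p.1 < n - 1 ∧ 2 < n then acc ++ ", ".toList else acc)
      acc
      = acc ++ l.flatMap (pvG state n) := by
  have h : (fun (acc : List Char) (p : Int × String) =>
        let acc := if p.1 = n - 1 ∧ 1 < n then acc ++ " and ".toList else acc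
        let town_link := "[[".toList ++ p.2.toList ++ ", ".toList ++ state.toList
                          ++ "|".toList ++ p.2.toList ++ "]]".toList
        let acc := acc ++ town_link
        if p.1 < n - 1 ∧ 2 < n then acc ++ ", ".toList else acc)
      = fun acc p => acc ++ pvG state n p := by
    funext acc p
    simp only [pvG]
    split_ifs <;> simp
  rw [h, PySem.List.foldl_append_eq_flatMap]

-- flatMap of "link then separator" is join-with-separator plus a trailing separator
theorem pvFlatMap_sep (sep : List Char) (ls : List (List Char)) (h : ls ≠ []) :
    ls.flatMap (fun x => x ++ sep) = PySem.Chars.join sep ls ++ sep := by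
  induction ls with
  | nil => exact absurd rfl h
  | cons x t ih =>
    cases t with
    | nil => simp [PySem.Chars.join_singleton]
    | cons y u =>
      simp only [List.flatMap_cons] at ih ⊢
      rw [ih (by simp), PySem.Chars.join_cons_cons]
      simp

theorem pvGetLastBang_concat (xs : List (List Char)) (x : List Char) :
    (xs ++ [x]).getLast! = x := by
  induction xs with
  | nil => rfl
  | cons y t ih =>
    cases t with
    | nil => rfl
    | cons z u => simpa using ih

theorem pvA_spec (town_list : List String) (state : String) :
    gen_town_string town_list state = gen_town_string_alt town_list state := by
  match town_list with
  | [] => rfl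
  | [a] =>
    simp only [gen_town_string, gen_town_string_alt, PySem.List.enumerate_cons,
      PySem.List.enumerate_nil, List.foldl, pvLink, List.map]
    norm_num
  | [a, b] =>
    simp only [gen_town_string, gen_town_string_alt, PySem.List.enumerate_cons,
      PySem.List.enumerate_nil, List.foldl, pvLink, List.map]
    norm_num
  | a :: b :: c :: rest =>
    -- length ≥ 3 : split off the last element
    set l : List String := a :: b :: c :: rest with hl
    have hne : l ≠ [] := by simp [hl]
    have hdec : l.dropLast ++ [l.getLast hne] = l := List.dropLast_append_getLast hne
    set init := l.dropLast with hinit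
    set z := l.getLast hne with hz
    have hlen : l.length = init.length + 1 := by rw [← hdec]; simp
    have hinitlen : 2 ≤ init.length := by
      have : l.length = rest.length + 3 := by simp [hl]
      omega
    set n : Int := (l.length : Int) with hn
    set sep : List Char := ", ".toList with hsep
    set lk : String → List Char := fun t => pvLink t state with hlk
    -- the A-side string, via the flatMap form of the loop
    have hmid : (PySem.List.enumerate init).flatMap (pvG state n)
        = (init.map lk).flatMap (fun x => x ++ sep) := by
      have hcg : ∀ p ∈ PySem.List.enumerate init, pvG state n p = lk p.2 ++ sep := by
        intro p hp
        obtain ⟨k, hk, hpk⟩ := (PySem.List.mem_enumerate_iff _ _ _).1 hp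
        have h1 : p.1 = (k : Int) := by rw [hpk]; simp
        have hne1 : ¬ (p.1 = n - 1 ∧ 1 < n) := by
          rintro ⟨he, -⟩; rw [h1] at he; omega
        have hlt : p.1 < n - 1 ∧ 2 < n := by
          rw [h1]; constructor <;> omega
        simp only [pvG, if_neg hne1, if_pos hlt, hlk, pvLink, List.nil_append]
        simp [hsep, List.append_assoc]
      calc (PySem.List.enumerate init).flatMap (pvG state n)
          = (PySem.List.enumerate init).flatMap (fun p => lk p.2 ++ sep) :=
            List.flatMap_congr hcg
        _ = ((PySem.List.enumerate init).map (·.2)).flatMap (fun t => lk t ++ sep) := by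
            rw [List.flatMap_map]
        _ = init.flatMap (fun t => lk t ++ sep) := by
            rw [PySem.List.map_snd_enumerate]
        _ = (init.map lk).flatMap (fun x => x ++ sep) := by rw [List.flatMap_map]
    have hlast : pvG state n ((init.length : Int), z) = " and ".toList ++ lk z := by
      have h1 : (init.length : Int) = n - 1 ∧ 1 < n := by constructor <;> omega
      have h2 : ¬ ((init.length : Int) < n - 1 ∧ 2 < n) := by rintro ⟨hc, -⟩; omega
      simp only [pvG, if_pos h1, if_neg h2, hlk, pvLink, List.append_nil]
    have hAstr : (PySem.List.enumerate l).foldl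
        (fun acc p =>
          let acc := if p.1 = n - 1 ∧ 1 < n then acc ++ " and ".toList else acc
          let town_link := "[[".toList ++ p.2.toList ++ ", ".toList ++ state.toList
                            ++ "|".toList ++ p.2.toList ++ "]]".toList
          let acc := acc ++ town_link
          if p.1 < n - 1 ∧ 2 < n then acc ++ ", ".toList else acc)
        []
        = PySem.Chars.join sep (init.map lk) ++ ",  and ".toList ++ lk z := by
      rw [pvA_fold_eq, List.nil_append]
      conv_lhs => rw [← hdec]
      rw [PySem.List.enumerate_append, List.flatMap_append, hmid]
      have : PySem.List.enumerate [z] ((0 : Int) + init.length) = [((init.length : Int), z)] := by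
        simp [PySem.List.enumerate_cons, PySem.List.enumerate_nil]
      rw [this]
      simp only [List.flatMap_cons, List.flatMap_nil, List.append_nil, hlast]
      rw [pvFlatMap_sep sep (init.map lk) (by
        simp only [ne_eq, List.map_eq_nil_iff]
        intro h0
        rw [h0] at hinitlen
        simp at hinitlen)]
      have hox : sep ++ " and ".toList = ",  and ".toList := by decide
      rw [← hox]
      simp [List.append_assoc]
    -- the B side on the cons shape
    have hlinks : l.map lk = init.map lk ++ [lk z] := by
      conv_lhs => rw [← hdec]; rw [List.map_append]
      rfl
    have hBstr : (gen_town_string_alt l state).1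
        = String.ofList (PySem.Chars.join sep ((l.map lk).dropLast)
            ++ ",  and ".toList ++ (l.map lk).getLast!) := by
      simp only [gen_town_string_alt, hl, List.map_cons, hlk, hsep]
    have hdrop : (l.map lk).dropLast = init.map lk := by
      rw [hlinks, List.dropLast_concat]
    have hlastb : (l.map lk).getLast! = lk z := by
      rw [hlinks, pvGetLastBang_concat]
    apply Prod.ext
    · show String.ofList _ = _
      rw [hBstr, hdrop, hlastb, hAstr]
    · show (if 1 < n then "towns" else "town") = _
      simp only [gen_town_string_alt]
      rw [if_pos (by omega : (1:Int) < n), if_pos (by omega : 1 < l.length)]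

-- ===== VERDICT (by name: the statement is the Claim_ definition above) =====
theorem gen_town_string_spec : Claim_equal_gen_town_string := by
  intro town_list state _
  show _ = _
  exact pvA_spec town_list state
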